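-- pv_equiv track=rewrite | github.com/qwwdfsad/uneval | cc.py | gen_hex_numbers
-- ===== SOURCE A (Python) =====
-- from collections import deque
--
-- def gen_hex_numbers(hex_chars, max_len, max_count):
--     """Generate hex numbers (BFS, shortest first) using only allowed hex chars."""
--     if max_len < 3 or not hex_chars:
--         return []
--     results = []
--     max_hd = max_len - 2
--     if '0' in hex_chars:
--         results.append((0, '0x0'))
--     nonzero_h = [d for d in hex_chars if d != '0']
--     q = deque((d, 1) for d in nonzero_h)
--     while q and len(results) < max_count:
--         hs, length = q.popleft()
--         results.append((int('0x' + hs, 16), '0x' + hs))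
--         if length < max_hd:
--             for d in hex_chars:
--                 q.append((hs + d, length + 1))
--     return results
-- ===== SOURCE B (Python) =====
-- def gen_hex_numbers(hex_chars, max_len, max_count):
--     """Generate hex numbers shortest-first, level by level (no deque, no per-item
--     length bookkeeping): each generation of strings is built from the previous one."""
--     if max_len < 3 or not hex_chars:
--         return []
--     results = [(0, '0x0')] if '0' in hex_chars else []
--     level = [d for d in hex_chars if d != '0']
--     length = 1
--     while level and length <= max_len - 2:
--         for hs in level:
--             if len(results) >= max_count:
--                 return results
--             results.append((int('0x' + hs, 16), '0x' + hs))
--         if length < max_len - 2: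
--             level = [hs + d for hs in level for d in hex_chars]
--         length += 1
--     return results
-- ===== Notes on version B (the rewrite author's own statement) =====
-- stated objective: faster
-- what changed: Replaces A's deque-based BFS over (string, length) pairs by level-by-level generation: each generation of hex strings is built from the previous one with a list comprehension and emitted in order, with the same 0x0 seeding and the same per-item max_count cutoff.
-- outside the precondition, e.g. on gen_hex_numbers(['1', 'g'], 3, 1): A returns [(1, '0x1')], B returns [(1, '0x1')]
import Mathlib
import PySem

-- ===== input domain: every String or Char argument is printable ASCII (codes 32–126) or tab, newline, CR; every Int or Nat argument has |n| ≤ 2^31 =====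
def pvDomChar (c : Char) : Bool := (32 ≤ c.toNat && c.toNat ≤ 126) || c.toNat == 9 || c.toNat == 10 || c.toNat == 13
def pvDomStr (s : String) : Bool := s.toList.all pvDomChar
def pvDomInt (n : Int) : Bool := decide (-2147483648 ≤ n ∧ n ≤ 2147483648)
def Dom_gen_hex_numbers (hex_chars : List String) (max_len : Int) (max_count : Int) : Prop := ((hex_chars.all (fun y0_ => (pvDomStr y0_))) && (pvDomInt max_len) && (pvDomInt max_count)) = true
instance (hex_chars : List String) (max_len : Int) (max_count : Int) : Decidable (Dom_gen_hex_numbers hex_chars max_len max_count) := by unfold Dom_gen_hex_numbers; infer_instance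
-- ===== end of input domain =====

-- B replaces A's deque BFS (queue of (string, length) pairs) by level-by-level generation:
-- each generation of strings is built from the previous one by a comprehension (measured
-- faster: A enqueues children per emitted item even past the max_count cutoff, B does not).
-- Equivalence is proved for the RETURN value on Pre_ (inputs where int('0x'+hs, 16) cannot raise).

-- ===== PORT A =====
-- shared helper: port of int('0x' + hs, 16); exact when hs consists of hex-digit
-- characters 0-9 a-f A-F, which Pre_gen_hex_numbers guarantees for every parsed hs.
def pvHexVal (c : Char) : Int :=
  if '0' ≤ c ∧ c ≤ '9' then (c.toNat : Int) - 48
  else if 'a' ≤ c ∧ c ≤ 'f' then (c.toNat : Int) - 87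
  else if 'A' ≤ c ∧ c ≤ 'F' then (c.toNat : Int) - 55
  else 0

def pvParseHex (s : String) : Int := s.toList.foldl (fun a c => a * 16 + pvHexVal c) 0

-- termination measure for A's BFS queue: potential of a node = size of its remaining subtree
def pvPot (k : Nat) : Nat → Nat
  | 0 => 1
  | n + 1 => 1 + k * pvPot k n

def pvQM (k : Nat) (max_hd : Int) (q : List (String × Int)) : Nat :=
  (q.map (fun p => pvPot k (max_hd - p.2).toNat)).sum

theorem pvPot_pos (k n : Nat) : 0 < pvPot k n := by
  cases n <;> simp [pvPot]

theorem pvSum_map_const {α : Type} (xs : List α) (c : Nat) :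
    (xs.map (fun _ => c)).sum = xs.length * c := by
  induction xs with
  | nil => simp
  | cons x xs ih => simp [Nat.succ_mul]; omega

theorem pvMeasure_step (cs : List String) (max_hd : Int) (hs : String) (l : Int)
    (q' : List (String × Int)) :
    pvQM cs.length max_hd
      (q' ++ (if l < max_hd then cs.map (fun d => (hs ++ d, l + 1)) else []))
      < pvQM cs.length max_hd ((hs, l) :: q') := by
  by_cases hl : l < max_hd
  · have h1 : (max_hd - l).toNat = (max_hd - (l + 1)).toNat + 1 := by omega
    simp only [if_pos hl, pvQM, List.map_append, List.sum_append, List.map_cons,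
      List.sum_cons, List.map_map]
    have h2 : ((cs.map ((fun p : String × Int => pvPot cs.length (max_hd - p.2).toNat) ∘
        fun d => (hs ++ d, l + 1)))).sum = cs.length * pvPot cs.length (max_hd - (l + 1)).toNat := by
      exact pvSum_map_const cs (pvPot cs.length (max_hd - (l + 1)).toNat)
    rw [h2, h1]
    simp [pvPot]
    omega
  · simp only [if_neg hl, List.append_nil, pvQM, List.map_cons, List.sum_cons]
    have := pvPot_pos cs.length (max_hd - l).toNat
    omega

-- the while-loop of A: pop front, emit, enqueue children while length < max_hd
def loopA (hex_chars : List String) (max_hd max_count : Int) :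
    List (String × Int) → List (Int × String) → List (Int × String)
  | [], results => results
  | (hs, length) :: q, results =>
    if max_count ≤ (results.length : Int) then results
    else loopA hex_chars max_hd max_count
      (q ++ (if length < max_hd then hex_chars.map (fun d => (hs ++ d, length + 1)) else []))
      (results ++ [(pvParseHex hs, "0x" ++ hs)])
termination_by q _ => pvQM hex_chars.length max_hd q
decreasing_by
  simp only [List.map_subtype, List.unattach_attach]
  exact pvMeasure_step hex_chars max_hd hs length q

def gen_hex_numbers (hex_chars : List String) (max_len : Int) (max_count : Int) :
    List (Int × String) :=
  if max_len < 3 ∨ hex_chars = [] then []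
  else
    loopA hex_chars (max_len - 2) max_count
      ((hex_chars.filter (fun d => d ≠ "0")).map (fun d => (d, (1 : Int))))
      (if hex_chars.contains "0" then [((0 : Int), "0x0")] else [])

-- ===== PORT B =====
-- the comprehension [hs + d for hs in level for d in hex_chars]
def pvNext (hex_chars level : List String) : List String :=
  level.flatMap (fun hs => hex_chars.map (fun d => hs ++ d))

-- the inner for-loop of B: emit each string, early-returning (flag true) once the cap is hit
def emitLevel (max_count : Int) :
    List String → List (Int × String) → List (Int × String) × Bool
  | [], results => (results, false)
  | hs :: level, results =>
    if max_count ≤ (results.length : Int) then (results, true)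
    else emitLevel max_count level (results ++ [(pvParseHex hs, "0x" ++ hs)])

-- the while-loop of B over generations
def goB (hex_chars : List String) (max_hd max_count : Int) (level : List String)
    (length : Int) (results : List (Int × String)) : List (Int × String) :=
  if level = [] ∨ max_hd < length then results
  else
    let p := emitLevel max_count level results
    if p.2 then p.1
    else
      goB hex_chars max_hd max_count
        (if length < max_hd then pvNext hex_chars level else level) (length + 1) p.1
termination_by (max_hd + 1 - length).toNat
decreasing_by simp only [not_or, not_lt] at *; omega

def gen_hex_numbers_alt (hex_chars : List String) (max_len : Int) (max_count : Int) :
    List (Int × String) :=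
  if max_len < 3 ∨ hex_chars = [] then []
  else
    goB hex_chars (max_len - 2) max_count (hex_chars.filter (fun d => d ≠ "0")) 1
      (if hex_chars.contains "0" then [((0 : Int), "0x0")] else [])

-- ===== PRECONDITION & SPEC =====
-- Pre_ excludes inputs on which Python A raises ValueError from int('0x'+hs, 16) — lists
-- containing a string that is empty or has a non-hex-digit character, once the loop actually
-- parses one; it also excludes (and cites) inputs with such strings where the max_count cutoff
-- stops the loop before any bad string is parsed, on which A and B return the same value.
def Pre_gen_hex_numbers (hex_chars : List String) (max_len : Int) (max_count : Int) : Prop :=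
  max_len < 3 ∨ hex_chars = [] ∨ hex_chars.filter (fun d => d ≠ "0") = [] ∨
  max_count ≤ (if hex_chars.contains "0" then (1 : Int) else 0) ∨
  (hex_chars.all (fun s => !s.toList.isEmpty &&
    s.toList.all (fun c =>
      ('0' ≤ c && c ≤ '9') || ('a' ≤ c && c ≤ 'f') || ('A' ≤ c && c ≤ 'F')))) = true
instance (hex_chars : List String) (max_len : Int) (max_count : Int) :
    Decidable (Pre_gen_hex_numbers hex_chars max_len max_count) := by
  unfold Pre_gen_hex_numbers; infer_instance

def pvWitness_gen_hex_numbers : List String × Int × Int := (["a", "0"], 4, 3)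

def Spec_gen_hex_numbers (hex_chars : List String) (max_len : Int) (max_count : Int)
    (out : List (Int × String)) : Prop := out = gen_hex_numbers_alt hex_chars max_len max_count
instance (hex_chars : List String) (max_len : Int) (max_count : Int)
    (out : List (Int × String)) : Decidable (Spec_gen_hex_numbers hex_chars max_len max_count out) := by
  unfold Spec_gen_hex_numbers; infer_instance

-- ===== CLAIM (what is proved, stated in full; the proofs are below) =====
def Claim_equal_gen_hex_numbers : Prop := ∀ (hex_chars : List String) (max_len : Int) (max_count : Int), Dom_gen_hex_numbers hex_chars max_len max_count → Pre_gen_hex_numbers hex_chars max_len max_count → Spec_gen_hex_numbers hex_chars max_len max_count (gen_hex_numbers hex_chars max_len max_count)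

-- ===== LEMMAS AND PROOFS =====

-- the full (uncapped) emission sequence of A's BFS from a queue
def fullSeqQ (hex_chars : List String) (max_hd : Int) :
    List (String × Int) → List (Int × String)
  | [] => []
  | (hs, length) :: q =>
    (pvParseHex hs, "0x" ++ hs) ::
      fullSeqQ hex_chars max_hd
        (q ++ (if length < max_hd then hex_chars.map (fun d => (hs ++ d, length + 1)) else []))
termination_by q => pvQM hex_chars.length max_hd q
decreasing_by
  simp only [List.map_subtype, List.unattach_attach]
  exact pvMeasure_step hex_chars max_hd hs length q

-- the full emission sequence, generation by generation (B's traversal order)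
def seqFrom (hex_chars : List String) (max_hd : Int) (level : List String) (length : Int) :
    List (Int × String) :=
  if level = [] then []
  else
    (level.map (fun hs => (pvParseHex hs, "0x" ++ hs))) ++
      (if length < max_hd then seqFrom hex_chars max_hd (pvNext hex_chars level) (length + 1) else [])
termination_by (max_hd - length).toNat
decreasing_by omega

-- queue-splitting: BFS emits the queued items first, then runs on their children
theorem fullSeqQ_append (hc : List String) (max_hd : Int) (xs cs : List (String × Int)) :
    fullSeqQ hc max_hd (xs ++ cs) =
      xs.map (fun p => (pvParseHex p.1, "0x" ++ p.1)) ++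
        fullSeqQ hc max_hd (cs ++ xs.flatMap (fun p =>
          if p.2 < max_hd then hc.map (fun d => (p.1 ++ d, p.2 + 1)) else [])) := by
  induction xs generalizing cs with
  | nil => simp
  | cons p xs ih =>
    obtain ⟨hs, l⟩ := p
    rw [List.cons_append, fullSeqQ, List.append_assoc, ih]
    simp [List.append_assoc]

-- a uniform-length queue emits exactly B's generation-by-generation sequence
theorem fullSeqQ_level (hc : List String) (max_hd : Int) :
    ∀ (n : Nat) (level : List String) (length : Int), (max_hd - length).toNat = n →
      fullSeqQ hc max_hd (level.map (fun hs => (hs, length))) = seqFrom hc max_hd level length := by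
  intro n
  induction n with
  | zero =>
    intro level length hn
    have hlm : ¬ length < max_hd := by omega
    have h := fullSeqQ_append hc max_hd (level.map (fun hs => (hs, length))) []
    simp only [List.append_nil, List.nil_append, List.flatMap_map, List.map_map] at h
    rw [seqFrom]
    by_cases hnil : level = []
    · simp [hnil, fullSeqQ]
    · simp only [if_neg hnil, if_neg hlm, List.append_nil]
      rw [h]
      simp only [hlm, if_false, Function.comp_def]
      rw [show List.flatMap (fun _ : String => ([] : List (String × Int))) level = [] from by
        simp, fullSeqQ]
      simp
  | succ n ih =>
    intro level length hn
    have h := fullSeqQ_append hc max_hd (level.map (fun hs => (hs, length))) []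
    simp only [List.append_nil, List.nil_append, List.flatMap_map, List.map_map] at h
    rw [seqFrom]
    by_cases hnil : level = []
    · simp [hnil, fullSeqQ]
    · simp only [if_neg hnil]
      by_cases hlm : length < max_hd
      · simp only [if_pos hlm]
        rw [h]
        simp only [hlm, if_pos]
        have hnext : (level.flatMap fun hs =>
            (hc.map fun d => (hs ++ d, length + 1))) =
            (pvNext hc level).map (fun hs => (hs, length + 1)) := by
          simp [pvNext, List.map_flatMap, List.map_map, Function.comp_def]
        rw [hnext, ih (pvNext hc level) (length + 1) (by omega)]
        simp [Function.comp_def]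
      · simp only [if_neg hlm, List.append_nil]
        rw [h]
        simp only [hlm, if_false, Function.comp_def]
        rw [show List.flatMap (fun _ : String => ([] : List (String × Int))) level = [] from by
          simp, fullSeqQ]
        simp

-- A's capped loop is the cap-length prefix of the full BFS sequence
theorem loopA_take (hc : List String) (max_hd max_count : Int) :
    ∀ (q : List (String × Int)) (res : List (Int × String)),
      loopA hc max_hd max_count q res =
        res ++ (fullSeqQ hc max_hd q).take ((max_count - res.length).toNat) := by
  intro q res
  generalize hq : pvQM hc.length max_hd q = n
  induction n using Nat.strong_induction_on generalizing q res with
  | _ n IH =>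
    cases q with
    | nil => rw [loopA]; simp [fullSeqQ]
    | cons p q' =>
      obtain ⟨hs, l⟩ := p
      rw [loopA, fullSeqQ]
      by_cases hcap : max_count ≤ (res.length : Int)
      · have h0 : (max_count - res.length).toNat = 0 := by omega
        simp [if_pos hcap, h0]
      · rw [if_neg hcap]
        have hlt := pvMeasure_step hc max_hd hs l q'
        rw [IH (pvQM hc.length max_hd
            (q' ++ if l < max_hd then hc.map (fun d => (hs ++ d, l + 1)) else []))
            (by omega) _ _ rfl]
        have h1 : (max_count - res.length).toNat =
            (max_count - ((res ++ [(pvParseHex hs, "0x" ++ hs)]).length : Int)).toNat + 1 := by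
          simp only [List.length_append, List.length_cons, List.length_nil]
          push_cast
          omega
        rw [h1, List.take_succ_cons, List.append_assoc]
        rfl

-- B's inner for-loop: result and early-return flag, in closed form
theorem emitLevel_eq (max_count : Int) :
    ∀ (level : List String) (res : List (Int × String)),
      emitLevel max_count level res =
        (res ++ (level.map (fun hs => (pvParseHex hs, "0x" ++ hs))).take
            ((max_count - res.length).toNat),
         decide (level ≠ [] ∧ max_count < res.length + level.length)) := by
  intro level
  induction level with
  | nil => intro res; simp [emitLevel]
  | cons hs level ih =>
    intro res
    rw [emitLevel]
    by_cases hcap : max_count ≤ (res.length : Int)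
    · have h0 : (max_count - res.length).toNat = 0 := by omega
      simp only [if_pos hcap, h0, List.take_zero, List.append_nil]
      refine Prod.ext rfl ?_
      rw [eq_comm, decide_eq_true_eq]
      refine ⟨by simp, ?_⟩
      simp only [List.length_cons]
      push_cast
      omega
    · have h1 : (max_count - res.length).toNat = (max_count - (res.length + 1)).toNat + 1 := by
        omega
      simp only [if_neg hcap, ih, List.length_append, List.length_cons, List.length_nil,
        List.map_cons, h1, List.take_succ_cons]
      refine Prod.ext (by simp [List.append_assoc]) ?_
      rw [decide_eq_decide]
      constructor
      · rintro ⟨-, h⟩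
        refine ⟨by simp, by push_cast at h ⊢; omega⟩
      · rintro ⟨-, h⟩
        push_cast at h ⊢
        constructor
        · intro habs
          subst habs
          simp at h
          omega
        · omega

-- B's while-loop is the cap-length prefix of the generation-by-generation sequence
theorem goB_take (hc : List String) (max_hd max_count : Int) :
    ∀ (n : Nat) (level : List String) (length : Int) (res : List (Int × String)),
      (max_hd - length).toNat = n → length ≤ max_hd →
        goB hc max_hd max_count level length res =
          res ++ (seqFrom hc max_hd level length).take ((max_count - res.length).toNat) := by
  intro n
  induction n with
  | zero =>
    intro level length res hn hle
    have hlm : ¬ length < max_hd := by omega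
    by_cases hnil : level = []
    · rw [goB]; simp [hnil, seqFrom]
    · rw [goB]
      have hcond : ¬ (level = [] ∨ max_hd < length) := by
        push Not; exact ⟨hnil, by omega⟩
      rw [if_neg hcond, emitLevel_eq]
      dsimp only
      by_cases hdone : level ≠ [] ∧ max_count < res.length + level.length
      · rw [decide_eq_true hdone, if_pos rfl, seqFrom, if_neg hnil, if_neg hlm,
          List.append_nil]
      · rw [decide_eq_false hdone, if_neg (by simp), if_neg hlm, goB]
        have hstop : level = [] ∨ max_hd < length + 1 := by right; omega
        rw [if_pos hstop, seqFrom, if_neg hnil, if_neg hlm, List.append_nil]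
  | succ n ih =>
    intro level length res hn hle
    by_cases hnil : level = []
    · rw [goB]; simp [hnil, seqFrom]
    · rw [goB]
      have hcond : ¬ (level = [] ∨ max_hd < length) := by
        push Not; exact ⟨hnil, by omega⟩
      rw [if_neg hcond, emitLevel_eq]
      dsimp only
      have hlm : length < max_hd := by omega
      by_cases hdone : level ≠ [] ∧ max_count < res.length + level.length
      · rw [decide_eq_true hdone, if_pos rfl, seqFrom, if_neg hnil, if_pos hlm]
        have hc1 : (max_count - res.length).toNat ≤
            (level.map (fun hs => (pvParseHex hs, "0x" ++ hs))).length := by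
          simp only [List.length_map]
          omega
        rw [List.take_append_of_le_length hc1]
      · rw [decide_eq_false hdone, if_neg (by simp), if_pos hlm]
        push Not at hdone
        have hge : (res.length : Int) + level.length ≤ max_count := hdone hnil
        have htake : (level.map (fun hs => (pvParseHex hs, "0x" ++ hs))).take
            ((max_count - res.length).toNat) =
            level.map (fun hs => (pvParseHex hs, "0x" ++ hs)) := by
          apply List.take_of_length_le
          simp only [List.length_map]
          omega
        rw [htake]
        conv_rhs => rw [seqFrom, if_neg hnil, if_pos hlm]
        rw [ih (pvNext hc level) (length + 1)
          (res ++ level.map (fun hs => (pvParseHex hs, "0x" ++ hs))) (by omega) (by omega)]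
        rw [List.take_append, htake, List.append_assoc]
        congr 2
        simp only [List.length_append, List.length_map]
        congr 1
        omega

theorem gen_eq (hc : List String) (ml mc : Int) :
    gen_hex_numbers hc ml mc = gen_hex_numbers_alt hc ml mc := by
  unfold gen_hex_numbers gen_hex_numbers_alt
  by_cases h : ml < 3 ∨ hc = []
  · simp [h]
  · rw [if_neg h, if_neg h]
    have h3 : 3 ≤ ml := by
      push Not at h
      omega
    rw [loopA_take, fullSeqQ_level hc (ml - 2) (ml - 2 - 1).toNat _ 1 rfl,
      goB_take hc (ml - 2) mc (ml - 2 - 1).toNat _ 1 _ rfl (by omega)]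

-- ===== VERDICT (by name: the statement is the Claim_ definition above) =====
theorem gen_hex_numbers_spec : Claim_equal_gen_hex_numbers := by
  intro hc ml mc _ _
  unfold Spec_gen_hex_numbers
  exact gen_eq hc ml mc
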